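-- pv_equiv track=rewrite | github.com/webalorn/kiro-libellules | code/solution_tiny.py | assign_all_perm_parents
-- ===== SOURCE A (Python) =====
-- def perm(longueur,l_all,previous,valable):
--     if len(previous) == longueur:
--         if valable:
--             l_all.append(previous)
--         return l_all
--
--     for i in range(4):
--         prod = False
--         if i == 1 or i == 2:
--             prod = True
--         act = previous + [i]
--         l_all = perm(longueur,l_all,act,(valable or prod))
--
--
--     return l_all
--
-- def generate_all_plants(sites):
--     nb_sites = len(sites)
--     return perm(nb_sites,[],[],False)
--
-- def processing_plants(sites):
--     prods = set()
--     distrib = set()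
--     for i in range(len(sites)):
--         if sites[i] == 1 or sites[i] == 2:
--             prods.add(i)
--         elif sites[i] == 3:
--             distrib.add(i)
--
--     return prods,distrib
--
-- def assign_parents(prods,distrib,parents,indice,possible):
--     if indice >= len(parents):
--         possible.append(parents)
--         return possible
--
--     if indice in distrib:
--         for x in prods:
--             p = parents[::]
--             p[indice] = x
--             possible = assign_parents(prods,distrib,p,indice+1,possible)
--
--     else:
--         possible = assign_parents(prods,distrib,parents,indice+1,possible)
--
--     return possible
--
-- def assign_all_perm_parents(sites):
--     l_all_perm = generate_all_plants(sites)
--     all_parents = []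
--     for perm in l_all_perm:
--         prods,distrib = processing_plants(perm)
--         l = assign_parents(prods,distrib,[-1]*len(sites),0,[])
--         all_parents.append(l)
--
--     return prods,distrib,l_all_perm,all_parents
-- ===== SOURCE B (Python) =====
-- def assign_all_perm_parents(sites):
--     n = len(sites)
--     # enumerate configurations by counting in base 4 (most-significant digit first
--     # = lexicographic order), keeping those containing a producer (value 1 or 2)
--     l_all_perm = []
--     for code in range(4 ** n):
--         cfg = [(code // 4 ** (n - 1 - k)) % 4 for k in range(n)]
--         if 1 in cfg or 2 in cfg:
--             l_all_perm.append(cfg)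
--     all_parents = []
--     for cfg in l_all_perm:
--         prods = [i for i in range(n) if cfg[i] == 1 or cfg[i] == 2]
--         distrib = [i for i in range(n) if cfg[i] == 3]
--         p, m = len(prods), len(distrib)
--         group = []
--         for code in range(p ** m):
--             combo = [prods[(code // p ** (m - 1 - k)) % p] for k in range(m)]
--             fill = [-1] * n
--             for k in range(m):
--                 fill[distrib[k]] = combo[k]
--             group.append(fill)
--         all_parents.append(group)
--     return set(prods), set(distrib), l_all_perm, all_parents
-- ===== Notes on version B (the rewrite author's own statement) =====
-- stated objective: alternative
-- what changed: Both recursive enumerations (perm over configurations, assign_parents over parent choices) are replaced by arithmetic base-4 / base-p counting: each configuration is decoded from a single integer code, and each parent assignment from a code in base len(prods), written into the distrib positions.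
-- outside the precondition, e.g. on assign_all_perm_parents([]): A raises UnboundLocalError, B raises UnboundLocalError
import Mathlib
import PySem

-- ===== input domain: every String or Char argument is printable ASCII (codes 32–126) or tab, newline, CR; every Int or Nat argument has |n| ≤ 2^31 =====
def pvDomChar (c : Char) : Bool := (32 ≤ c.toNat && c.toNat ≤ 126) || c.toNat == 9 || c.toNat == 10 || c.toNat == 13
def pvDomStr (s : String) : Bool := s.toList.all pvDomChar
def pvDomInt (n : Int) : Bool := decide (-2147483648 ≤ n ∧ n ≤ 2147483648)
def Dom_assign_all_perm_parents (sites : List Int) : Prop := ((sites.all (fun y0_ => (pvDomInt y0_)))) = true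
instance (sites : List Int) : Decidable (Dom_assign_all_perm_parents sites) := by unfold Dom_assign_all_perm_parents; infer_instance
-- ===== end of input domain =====

-- B replaces both recursive enumerations of A (perm over configurations, assign_parents over
-- parent choices) by arithmetic base-4 / base-p counting (objective: alternative decomposition,
-- same asymptotic cost).  Neither implementation mutates its argument.


-- ===== PORT A =====
-- perm: the 'for i in range(4)' body is unrolled (i = 0,1,2,3, in order, with the literal
-- 'prod' value of each i folded in).  Structural recursion on an explicit fuel: Python's
-- recursion depth from generate_all_plants is exactly len(sites)+1, so the fuel-0 branch is
-- unreachable — a totality guard only.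
def permA (fuel : Nat) (longueur : Int) (l_all : List (List Int)) (previous : List Int) (valable : Bool) : List (List Int) :=
  match fuel with
  | 0 => l_all
  | fuel + 1 =>
    if (previous.length : Int) = longueur then
      if valable then l_all ++ [previous] else l_all
    else
      let a0 := permA fuel longueur l_all (previous ++ [0]) (valable || false)
      let a1 := permA fuel longueur a0 (previous ++ [1]) (valable || true)
      let a2 := permA fuel longueur a1 (previous ++ [2]) (valable || true)
      permA fuel longueur a2 (previous ++ [3]) (valable || false)

def generate_all_plants (sites : List Int) : List (List Int) :=
  permA (sites.length + 1) (sites.length : Int) [] [] false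

def processing_plants (sites : List Int) : PySem.Set Int × PySem.Set Int :=
  (PySem.List.pyRange 0 (PySem.List.len sites) 1).foldl
    (fun (st : PySem.Set Int × PySem.Set Int) i =>
      if PySem.List.pyGetD sites i 0 == 1 || PySem.List.pyGetD sites i 0 == 2 then
        (PySem.Set.add st.1 i, st.2)
      else if PySem.List.pyGetD sites i 0 == 3 then
        (st.1, PySem.Set.add st.2 i)
      else st)
    (PySem.Set.empty, PySem.Set.empty)

def assignA (fuel : Nat) (prods distrib : PySem.Set Int) (parents : List Int) (indice : Int)
    (possible : List (List Int)) : List (List Int) :=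
  match fuel with
  | 0 => possible
  | fuel + 1 =>
    if (parents.length : Int) ≤ indice then possible ++ [parents]
    else if distrib.contains indice then
      prods.foldl
        (fun poss x => assignA fuel prods distrib (PySem.List.pySetD parents indice x) (indice + 1) poss)
        possible
    else assignA fuel prods distrib parents (indice + 1) possible

def assign_all_perm_parents (sites : List Int) : List Int × List Int × List (List Int) × List (List (List Int)) :=
  let l_all_perm := generate_all_plants sites
  let st := l_all_perm.foldl
    (fun (st : PySem.Set Int × PySem.Set Int × List (List (List Int))) perm =>
      let pd := processing_plants perm
      let l := assignA (sites.length + 1) pd.1 pd.2 (List.replicate sites.length (-1)) 0 []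
      (pd.1, pd.2, st.2.2 ++ [l]))
    (PySem.Set.empty, PySem.Set.empty, [])
  (st.1, st.2.1, l_all_perm, st.2.2)

-- ===== PORT B =====
def altCfg (n : Nat) (code : Int) : List Int :=
  (PySem.List.pyRange 0 (n : Int) 1).map
    (fun k => PySem.Int.mod (PySem.Int.floordiv code ((4 : Int) ^ ((n : Int) - 1 - k).toNat)) 4)

def altGroup (n : Nat) (prods distrib : List Int) : List (List Int) :=
  let p := prods.length
  let m := distrib.length
  (PySem.List.pyRange 0 ((p : Int) ^ m) 1).foldl
    (fun g code =>
      let combo := (PySem.List.pyRange 0 (m : Int) 1).map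
        (fun k => PySem.List.pyGetD prods
          (PySem.Int.mod (PySem.Int.floordiv code ((p : Int) ^ ((m : Int) - 1 - k).toNat)) p) 0)
      let fill := (PySem.List.pyRange 0 (m : Int) 1).foldl
        (fun f k => PySem.List.pySetD f (PySem.List.pyGetD distrib k 0) (PySem.List.pyGetD combo k 0))
        (List.replicate n (-1))
      g ++ [fill])
    []

def assign_all_perm_parents_alt (sites : List Int) : List Int × List Int × List (List Int) × List (List (List Int)) :=
  let n := sites.length
  let l_all_perm := (PySem.List.pyRange 0 ((4 : Int) ^ n) 1).foldl
    (fun acc code =>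
      let cfg := altCfg n code
      if cfg.contains 1 || cfg.contains 2 then acc ++ [cfg] else acc)
    []
  let st := l_all_perm.foldl
    (fun (st : List Int × List Int × List (List (List Int))) cfg =>
      let prods := (PySem.List.pyRange 0 (n : Int) 1).filter
        (fun i => PySem.List.pyGetD cfg i 0 == 1 || PySem.List.pyGetD cfg i 0 == 2)
      let distrib := (PySem.List.pyRange 0 (n : Int) 1).filter
        (fun i => PySem.List.pyGetD cfg i 0 == 3)
      (prods, distrib, st.2.2 ++ [altGroup n prods distrib]))
    ([], [], [])
  (PySem.Set.ofList st.1, PySem.Set.ofList st.2.1, l_all_perm, st.2.2)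

-- ===== PRECONDITION & SPEC =====
-- Pre_ excludes only sites = [], on which Python A raises UnboundLocalError (l_all_perm is
-- empty, so prods/distrib are never bound before the final return).
def Pre_assign_all_perm_parents (sites : List Int) : Prop := sites ≠ []
instance (sites : List Int) : Decidable (Pre_assign_all_perm_parents sites) := by
  unfold Pre_assign_all_perm_parents; infer_instance
def pvWitness_assign_all_perm_parents : List Int := [0]

def Spec_assign_all_perm_parents (sites : List Int) (out : List Int × List Int × List (List Int) × List (List (List Int))) : Prop := out = assign_all_perm_parents_alt sites
instance (sites : List Int) (out : List Int × List Int × List (List Int) × List (List (List Int))) : Decidable (Spec_assign_all_perm_parents sites out) := by unfold Spec_assign_all_perm_parents; infer_instance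

-- ===== CLAIM (what is proved, stated in full; the proofs are below) =====
def Claim_equal_assign_all_perm_parents : Prop := ∀ (sites : List Int), Dom_assign_all_perm_parents sites → Pre_assign_all_perm_parents sites → Spec_assign_all_perm_parents sites (assign_all_perm_parents sites)

-- ===== LEMMAS AND PROOFS =====
def tupN (b : Nat) : Nat → List (List Nat)
  | 0 => [[]]
  | m + 1 => (List.range b).flatMap (fun i => (tupN b m).map (i :: ·))

def castT (t : List Nat) : List Int := t.map (fun x => (x : Int))

def wordsOver (ps : List Int) : Nat → List (List Int)
  | 0 => [[]]
  | m + 1 => ps.flatMap (fun x => (wordsOver ps m).map (x :: ·))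

def writeAll (parents ds xs : List Int) : List Int :=
  (ds.zip xs).foldl (fun p dx => PySem.List.pySetD p dx.1 dx.2) parents

def prodsOf (cfg : List Int) : List Int :=
  (PySem.List.pyRange 0 (cfg.length : Int) 1).filter
    (fun i => PySem.List.pyGetD cfg i 0 == 1 || PySem.List.pyGetD cfg i 0 == 2)

def distribOf (cfg : List Int) : List Int :=
  (PySem.List.pyRange 0 (cfg.length : Int) 1).filter
    (fun i => PySem.List.pyGetD cfg i 0 == 3)

theorem tupN_length {b m : Nat} {t : List Nat} (h : t ∈ tupN b m) : t.length = m := by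
  induction m generalizing t with
  | zero => simp [tupN] at h; simp [h]
  | succ m ih =>
    simp [tupN] at h
    obtain ⟨i, hi, t', ht', rfl⟩ := h
    simp [ih ht']

theorem range_mul (b M : Nat) :
    List.range (b * M) = (List.range b).flatMap (fun q => (List.range M).map (fun r => q * M + r)) := by
  induction b with
  | zero => simp
  | succ b ih =>
    rw [Nat.succ_mul, List.range_add, ih, List.range_succ]
    simp [List.flatMap_append, Nat.mul_comm]

theorem decode_range (b m : Nat) :
    (List.range (b ^ m)).map (fun c => (List.range m).map (fun k => c / b ^ (m - 1 - k) % b))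
      = tupN b m := by
  induction m with
  | zero => simp [tupN]
  | succ m ih =>
    rw [pow_succ, Nat.mul_comm, range_mul, List.map_flatMap, tupN, ← ih]
    apply List.flatMap_congr
    intro q hq
    rw [List.map_map, List.map_map]
    apply List.map_congr_left
    intro r hr
    simp only [List.mem_range] at hq hr
    have hb : 0 < b := Nat.pos_of_ne_zero (by rintro rfl; omega)
    simp only [Function.comp]
    rw [List.range_succ_eq_map, List.map_cons, List.map_map]
    congr 1
    · -- head digit: (q * b^m + r) / b^m % b = q
      have h1 : (q * b ^ m + r) / b ^ m = q := by
        rw [Nat.mul_comm, Nat.mul_add_div (Nat.pow_pos hb), Nat.div_eq_of_lt hr, Nat.add_zero]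
      simp [h1, Nat.mod_eq_of_lt hq]
    · apply List.map_congr_left
      intro k hk
      simp only [List.mem_range] at hk
      simp only [Function.comp]
      have he : m + 1 - 1 - (k + 1) = m - 1 - k := by omega
      rw [he]
      have hsplit : b ^ m = b ^ (k + 1) * b ^ (m - 1 - k) := by
        rw [← pow_add]; congr 1; omega
      have h2 : (q * b ^ m + r) / b ^ (m - 1 - k) = r / b ^ (m - 1 - k) + q * b ^ (k + 1) := by
        rw [hsplit, ← Nat.mul_assoc, Nat.add_comm,
            Nat.add_mul_div_right _ _ (Nat.pow_pos hb)]
      rw [h2, pow_succ, ← Nat.mul_assoc, Nat.add_mul_mod_self_right]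

theorem permA_spec (n : Nat) : ∀ (m : Nat) (fuel : Nat) (prev : List Int) (l_all : List (List Int)) (val : Bool),
    prev.length + m = n → m < fuel →
    permA fuel (n : Int) l_all prev val
      = l_all ++ (((tupN 4 m).map castT).filter
          (fun t => val || (t.contains 1 || t.contains 2))).map (fun t => prev ++ t) := by
  intro m
  induction m with
  | zero =>
    intro fuel prev l_all val h hf
    match fuel with
    | fuel + 1 =>
      rw [permA]
      simp at h
      simp [h, tupN, castT]
      cases val <;> simp
  | succ m ih =>
    intro fuel prev l_all val h hf
    match fuel with
    | fuel + 1 =>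
      rw [permA]
      have h1 : ¬ ((prev.length : Int) = (n : Int)) := by omega
      rw [if_neg h1]
      dsimp only
      have hlen : ∀ (i : Int), (prev ++ [i]).length + m = n := by
        intro i; simp [List.length_append]; omega
      have hf' : m < fuel := by omega
      rw [ih fuel (prev ++ [(0:Int)]) l_all (val || false) (hlen 0) hf']
      rw [ih fuel (prev ++ [(1:Int)]) _ (val || true) (hlen 1) hf']
      rw [ih fuel (prev ++ [(2:Int)]) _ (val || true) (hlen 2) hf']
      rw [ih fuel (prev ++ [(3:Int)]) _ (val || false) (hlen 3) hf']
      show _ = l_all ++ (((tupN 4 (m+1)).map _).filter _).map _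
      rw [tupN]
      have hr4 : List.range 4 = [0,1,2,3] := by decide
      rw [hr4]
      simp only [List.flatMap_cons, List.flatMap_nil, List.append_nil, List.map_append,
        List.filter_append, List.map_map, List.filter_map, Function.comp_def]
      cases val <;> simp [castT, List.append_assoc]

theorem castT_map (l : List Nat) (g : Nat → Nat) :
    castT (l.map g) = l.map (fun x => ((g x : Nat) : Int)) := by
  simp [castT, List.flatMap_map]
  exact Eq.symm List.map_eq_flatMap

theorem altCfg_natCast (n c : Nat) :
    altCfg n (c : Int)
      = castT ((List.range n).map (fun k => c / 4 ^ (n - 1 - k) % 4)) := by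
  unfold altCfg
  rw [castT_map, PySem.List.pyRange_zero_natCast, List.map_map]
  apply List.map_congr_left
  intro k hk
  simp only [List.mem_range] at hk
  simp only [Function.comp]
  have he : (((n : Int)) - 1 - (k : Int)).toNat = n - 1 - k := by omega
  rw [he]
  have h4 : ((4 : Int) ^ (n - 1 - k)) = ((4 ^ (n - 1 - k) : Nat) : Int) := by push_cast; ring
  rw [h4, PySem.Int.floordiv_natCast, show ((4:Int)) = ((4:Nat):Int) from rfl,
    PySem.Int.mod_natCast]

theorem lB_eq (n : Nat) :
    (PySem.List.pyRange 0 ((4 : Int) ^ n) 1).foldl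
      (fun acc code =>
        let cfg := altCfg n code
        if cfg.contains 1 || cfg.contains 2 then acc ++ [cfg] else acc) []
    = ((tupN 4 n).map castT).filter
        (fun t => t.contains 1 || t.contains 2) := by
  rw [PySem.List.foldl_append_if (fun code => (altCfg n code).contains 1 || (altCfg n code).contains 2) (altCfg n)]
  rw [show ((fun code => (altCfg n code).contains 1 || (altCfg n code).contains 2))
      = ((fun t : List Int => t.contains 1 || t.contains 2) ∘ altCfg n) from rfl]
  rw [← List.filter_map, List.nil_append]
  congr 1
  have h4 : ((4:Int) ^ n) = ((4 ^ n : Nat) : Int) := by push_cast; ring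
  rw [h4, PySem.List.pyRange_zero_natCast, List.map_map, ← decode_range 4 n, List.map_map]
  apply List.map_congr_left
  intro c _
  simp only [Function.comp]
  exact altCfg_natCast n c

theorem foldl_add_if_fresh (p : Int → Bool) :
    ∀ (l : List Int) (s : PySem.Set Int), l.Nodup → (∀ x ∈ l, x ∉ s) →
      l.foldl (fun s i => if p i then PySem.Set.add s i else s) s = s ++ l.filter p := by
  intro l
  induction l with
  | nil => simp
  | cons x xs ih =>
    intro s hnd hf
    have hx : x ∉ s := hf x (by simp)
    have hadd : PySem.Set.add s x = s ++ [x] := PySem.Set.add_of_not_mem hx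
    have hstep : ∀ y ∈ xs, y ∉ (if p x then PySem.Set.add s x else s) := by
      intro y hy
      have hyx : y ≠ x := by
        intro h; subst h; exact (List.nodup_cons.1 hnd).1 hy
      have hys : y ∉ s := hf y (by simp [hy])
      split <;> simp [hadd, hys, hyx]
    rw [List.foldl_cons, ih _ (List.nodup_cons.1 hnd).2 hstep]
    by_cases hp : p x <;> simp [hp, hadd]

theorem processing_plants_eq (cfg : List Int) :
    processing_plants cfg = (prodsOf cfg, distribOf cfg) := by
  unfold processing_plants prodsOf distribOf
  rw [PySem.List.foldl_congr_mem _ _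
    (fun (st : PySem.Set Int × PySem.Set Int) i =>
      ((if PySem.List.pyGetD cfg i 0 == 1 || PySem.List.pyGetD cfg i 0 == 2
          then PySem.Set.add st.1 i else st.1),
       (if PySem.List.pyGetD cfg i 0 == 3 then PySem.Set.add st.2 i else st.2))) _ ?_]
  · rw [PySem.List.foldl_prod_mk
      (f := fun (s : PySem.Set Int) i =>
        if PySem.List.pyGetD cfg i 0 == 1 || PySem.List.pyGetD cfg i 0 == 2
          then PySem.Set.add s i else s)
      (g := fun (s : PySem.Set Int) i =>
        if PySem.List.pyGetD cfg i 0 == 3 then PySem.Set.add s i else s)]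
    rw [foldl_add_if_fresh _ _ _ (PySem.List.nodup_pyRange_one 0 _) (by simp [PySem.Set.empty]),
        foldl_add_if_fresh _ _ _ (PySem.List.nodup_pyRange_one 0 _) (by simp [PySem.Set.empty])]
    simp [PySem.List.len_eq, PySem.Set.empty]
  · intro acc x _
    by_cases h1 : (PySem.List.pyGetD cfg x 0 == 1 || PySem.List.pyGetD cfg x 0 == 2) = true
    · have h3 : ¬ ((PySem.List.pyGetD cfg x 0 == 3) = true) := by
        simp at h1 ⊢; omega
      simp [h1, h3]
    · simp [h1]
      split <;> rfl

theorem filt_cons (l : List Int) (hp : l.Pairwise (· < ·)) (ind : Int) (h : ind ∈ l) :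
    l.filter (fun x => decide (ind ≤ x)) = ind :: l.filter (fun x => decide (ind + 1 ≤ x)) := by
  induction l with
  | nil => cases h
  | cons a as ih =>
    have hlt : ∀ y ∈ as, a < y := fun y hy => (List.pairwise_cons.1 hp).1 y hy
    rcases List.mem_cons.1 h with rfl | h
    · have h1 : as.filter (fun x => decide (ind ≤ x)) = as.filter (fun x => decide (ind + 1 ≤ x)) := by
        apply List.filter_congr
        intro y hy
        have := hlt y hy
        simp; omega
      simp only [List.filter_cons]
      simp [h1]
    · have ha : a < ind := hlt ind h
      have h0 : ¬ (ind ≤ a) := by omega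
      have h0' : ¬ (ind + 1 ≤ a) := by omega
      simp only [List.filter_cons]
      simp [h0, h0', ih (List.Pairwise.of_cons hp) h]

theorem filt_skip (l : List Int) (ind : Int) (h : ind ∉ l) :
    l.filter (fun x => decide (ind ≤ x)) = l.filter (fun x => decide (ind + 1 ≤ x)) := by
  apply List.filter_congr
  intro y hy
  have : y ≠ ind := fun he => h (he ▸ hy)
  simp; omega

theorem assignA_spec (prods distrib : List Int) (n : Nat)
    (hd : ∀ x ∈ distrib, 0 ≤ x ∧ x < (n : Int)) (hsort : distrib.Pairwise (· < ·)) :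
    ∀ (fuel ind : Nat) (parents : List Int) (possible : List (List Int)),
      parents.length = n → ind ≤ n → n - ind < fuel →
      assignA fuel prods distrib parents (ind : Int) possible
        = possible ++ (wordsOver prods (distrib.filter (fun x => decide ((ind : Int) ≤ x))).length).map
            (fun w => writeAll parents (distrib.filter (fun x => decide ((ind : Int) ≤ x))) w) := by
  intro fuel
  induction fuel with
  | zero => intro ind parents possible _ _ h; omega
  | succ fuel ih =>
    intro ind parents possible hlen hind hfuel
    rw [assignA]
    by_cases hn : ind = n
    · subst hn
      have hle : ((parents.length : Int) ≤ (ind : Int)) := by omega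
      rw [if_pos hle]
      have hfilt : distrib.filter (fun x => decide ((ind : Int) ≤ x)) = [] := by
        rw [List.filter_eq_nil_iff]
        intro x hx
        have := hd x hx
        simp; omega
      simp [hfilt, wordsOver, writeAll]
    · have hlt : ind < n := by omega
      have hle : ¬ ((parents.length : Int) ≤ (ind : Int)) := by
        rw [hlen]; omega
      rw [if_neg hle]
      have hcast : ((ind : Int) + 1) = (((ind + 1 : Nat)) : Int) := by push_cast; ring
      by_cases hmem : (ind : Int) ∈ distrib
      · have hcon : PySem.Set.contains distrib (ind : Int) = true := by
          have h' : distrib.contains (ind : Int) = true := by simpa using hmem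
          exact h'
        rw [if_pos hcon]
        have hdt := filt_cons distrib hsort (ind : Int) hmem
        rw [PySem.List.foldl_congr_mem _ _
          (fun poss x => poss ++ (wordsOver prods (distrib.filter (fun x => decide ((ind : Int) + 1 ≤ x))).length).map
            (fun w => writeAll (PySem.List.pySetD parents (ind : Int) x) (distrib.filter (fun x => decide ((ind : Int) + 1 ≤ x))) w)) _ ?_]
        · rw [PySem.List.foldl_append_eq_flatMap]
          congr 1
          rw [hdt]
          show _ = (wordsOver prods ((distrib.filter (fun x => decide ((ind:Int) + 1 ≤ x))).length + 1)).map _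
          rw [wordsOver]
          rw [List.map_flatMap]
          apply List.flatMap_congr
          intro x _
          rw [List.map_map]
          apply List.map_congr_left
          intro w _
          simp [Function.comp, writeAll]
        · intro acc x _
          rw [hcast, ih (ind + 1) (PySem.List.pySetD parents (ind : Int) x) acc
            (by rw [PySem.List.length_pySetD, hlen]) (by omega) (by omega)]
      · have hcon : ¬ (PySem.Set.contains distrib (ind : Int) = true) := by
          have h' : ¬ (distrib.contains (ind : Int) = true) := by simpa using hmem
          exact h'
        rw [if_neg hcon]
        rw [hcast, ih (ind + 1) parents possible hlen (by omega) (by omega), ← hcast]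
        rw [filt_skip distrib (ind : Int) hmem]

theorem map_getD_range (l : List Int) : (List.range l.length).map (fun d => l.getD d 0) = l := by
  apply List.ext_getElem (by simp)
  intro i h1 h2
  simp [List.getD_eq_getElem?_getD, List.getElem?_eq_getElem h2]

theorem wordsOver_eq_tupN (ps : List Int) (m : Nat) :
    (tupN ps.length m).map (fun t => t.map (fun d => ps.getD d 0)) = wordsOver ps m := by
  induction m with
  | zero => simp [tupN, wordsOver]
  | succ m ih =>
    rw [tupN, wordsOver, List.map_flatMap]
    have h2 : ps.flatMap (fun x => (wordsOver ps m).map (x :: ·))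
        = ((List.range ps.length).map (fun d => ps.getD d 0)).flatMap
            (fun x => (wordsOver ps m).map (x :: ·)) := by
      rw [map_getD_range]
    rw [h2, List.flatMap_map]
    apply List.flatMap_congr
    intro d _
    rw [← ih]
    simp only [List.map_map]
    rfl

theorem foldl_range_zip (m : Nat) (ds xs base : List Int) (hds : ds.length = m) (hxs : xs.length = m) :
    (List.range m).foldl (fun f j => PySem.List.pySetD f (ds.getD j 0) (xs.getD j 0)) base
      = writeAll base ds xs := by
  have hz : ds.zip xs = (List.range m).map (fun j => (ds.getD j 0, xs.getD j 0)) := by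
    apply List.ext_getElem (by simp [hds, hxs])
    intro i h1 h2
    have hi : i < ds.length ∧ i < xs.length := by
      simp [List.length_zip] at h1; omega
    simp [List.getElem_zip, List.getD_eq_getElem?_getD,
      List.getElem?_eq_getElem hi.1, List.getElem?_eq_getElem hi.2]
  rw [writeAll, hz, List.foldl_map]

theorem altGroup_eq (n : Nat) (prods distrib : List Int) :
    altGroup n prods distrib
      = (wordsOver prods distrib.length).map
          (fun w => writeAll (List.replicate n (-1)) distrib w) := by
  unfold altGroup
  dsimp only
  rw [PySem.List.foldl_append_singleton_eq_map]
  rw [List.nil_append]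
  have hp : ((prods.length : Int) ^ distrib.length) = ((prods.length ^ distrib.length : Nat) : Int) := by
    push_cast; ring
  rw [hp, PySem.List.pyRange_zero_natCast (prods.length ^ distrib.length), List.map_map]
  rw [← wordsOver_eq_tupN, ← decode_range prods.length distrib.length, List.map_map, List.map_map]
  apply List.map_congr_left
  intro c _
  simp only [Function.comp]
  -- combo normalization
  have hcombo : (PySem.List.pyRange 0 (distrib.length : Int) 1).map
      (fun k => PySem.List.pyGetD prods
        (PySem.Int.mod (PySem.Int.floordiv (c : Int) ((prods.length : Int) ^ (((distrib.length : Int)) - 1 - k).toNat)) (prods.length : Int)) 0)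
      = ((List.range distrib.length).map
          (fun k => c / prods.length ^ (distrib.length - 1 - k) % prods.length)).map
          (fun d => prods.getD d 0) := by
    rw [PySem.List.pyRange_zero_natCast, List.map_map, List.map_map]
    apply List.map_congr_left
    intro k hk
    simp only [List.mem_range] at hk
    simp only [Function.comp]
    have he : (((distrib.length : Int)) - 1 - (k : Int)).toNat = distrib.length - 1 - k := by omega
    rw [he]
    have h4 : ((prods.length : Int) ^ (distrib.length - 1 - k)) = ((prods.length ^ (distrib.length - 1 - k) : Nat) : Int) := by push_cast; ring
    rw [h4, PySem.Int.floordiv_natCast, PySem.Int.mod_natCast, PySem.List.pyGetD_natCast]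
  rw [hcombo]
  -- fill normalization
  rw [PySem.List.pyRange_zero_natCast, List.foldl_map]
  rw [PySem.List.foldl_congr_mem _ _
    (fun (f : List Int) (j : Nat) => PySem.List.pySetD f (distrib.getD j 0)
      ((((List.range distrib.length).map
          (fun k => c / prods.length ^ (distrib.length - 1 - k) % prods.length)).map
          (fun d => prods.getD d 0)).getD j 0)) _ ?_]
  · rw [foldl_range_zip distrib.length distrib _ _ rfl (by simp)]
  · intro acc j _
    rw [PySem.List.pyGetD_natCast, PySem.List.pyGetD_natCast]

theorem castT_length (t : List Nat) : (castT t).length = t.length := by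
  simp [castT]

theorem distribOf_bounds (cfg : List Int) : ∀ x ∈ distribOf cfg, 0 ≤ x ∧ x < (cfg.length : Int) := by
  intro x hx
  have := List.of_mem_filter hx
  have hx' := List.mem_of_mem_filter hx
  exact PySem.List.mem_pyRange_one.1 hx'

theorem distribOf_sorted (cfg : List Int) : (distribOf cfg).Pairwise (· < ·) :=
  (PySem.List.pairwise_lt_pyRange_one 0 _).sublist List.filter_sublist

theorem stepAB (n : Nat) (cfg : List Int) (hlen : cfg.length = n) :
    assignA (n + 1) (prodsOf cfg) (distribOf cfg) (List.replicate n (-1)) 0 []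
      = altGroup n (prodsOf cfg) (distribOf cfg) := by
  have h0 : ((0 : Nat) : Int) = (0 : Int) := rfl
  have hspec := assignA_spec (prodsOf cfg) (distribOf cfg) n
    (by rw [← hlen]; exact distribOf_bounds cfg) (distribOf_sorted cfg)
    (n + 1) 0 (List.replicate n (-1)) [] (by simp) (by omega) (by omega)
  rw [h0] at hspec
  have hfilt : (distribOf cfg).filter (fun x => decide ((0 : Int) ≤ x)) = distribOf cfg := by
    rw [List.filter_eq_self]
    intro x hx
    have := distribOf_bounds cfg x hx
    simp; omega
  rw [hfilt] at hspec
  rw [hspec, altGroup_eq, List.nil_append]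

theorem finalState_nodup (n : Nat) (L : List (List Int)) :
    (L.foldl (fun (st : List Int × List Int × List (List (List Int))) (cfg : List Int) =>
        let prods := (PySem.List.pyRange 0 (n : Int) 1).filter
          (fun i => PySem.List.pyGetD cfg i 0 == 1 || PySem.List.pyGetD cfg i 0 == 2)
        let distrib := (PySem.List.pyRange 0 (n : Int) 1).filter
          (fun i => PySem.List.pyGetD cfg i 0 == 3)
        (prods, distrib, st.2.2 ++ [altGroup n prods distrib])) ([], [], [])).1.Nodup
    ∧ (L.foldl (fun (st : List Int × List Int × List (List (List Int))) (cfg : List Int) =>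
        let prods := (PySem.List.pyRange 0 (n : Int) 1).filter
          (fun i => PySem.List.pyGetD cfg i 0 == 1 || PySem.List.pyGetD cfg i 0 == 2)
        let distrib := (PySem.List.pyRange 0 (n : Int) 1).filter
          (fun i => PySem.List.pyGetD cfg i 0 == 3)
        (prods, distrib, st.2.2 ++ [altGroup n prods distrib])) ([], [], [])).2.1.Nodup := by
  rcases List.eq_nil_or_concat L with rfl | ⟨L', b, rfl⟩
  · simp
  · rw [List.concat_eq_append, List.foldl_append]
    constructor
    · exact (PySem.List.nodup_pyRange_one 0 _).filter _
    · exact (PySem.List.nodup_pyRange_one 0 _).filter _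

theorem main_eq (sites : List Int) :
    assign_all_perm_parents sites = assign_all_perm_parents_alt sites := by
  unfold assign_all_perm_parents assign_all_perm_parents_alt generate_all_plants
  dsimp only
  set n := sites.length with hn
  -- the two configuration lists agree
  have hperm : permA (n + 1) (n : Int) [] [] false
      = ((tupN 4 n).map castT).filter (fun t => t.contains 1 || t.contains 2) := by
    rw [permA_spec n n (n + 1) [] [] false (by simp) (by omega)]
    simp
  rw [hperm, lB_eq n]
  set L := ((tupN 4 n).map castT).filter (fun t => t.contains 1 || t.contains 2) with hL
  have hmemlen : ∀ cfg ∈ L, cfg.length = n := by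
    intro cfg hcfg
    have := List.mem_of_mem_filter hcfg
    obtain ⟨t, ht, rfl⟩ := List.mem_map.1 this
    rw [castT_length, tupN_length ht]
  -- both folds compute the same state
  have hfold : L.foldl
      (fun (st : PySem.Set Int × PySem.Set Int × List (List (List Int))) perm =>
        let pd := processing_plants perm
        let l := assignA (n + 1) pd.1 pd.2 (List.replicate n (-1)) 0 []
        (pd.1, pd.2, st.2.2 ++ [l]))
      (PySem.Set.empty, PySem.Set.empty, [])
    = L.foldl
      (fun (st : List Int × List Int × List (List (List Int))) cfg =>
        let prods := (PySem.List.pyRange 0 (n : Int) 1).filter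
          (fun i => PySem.List.pyGetD cfg i 0 == 1 || PySem.List.pyGetD cfg i 0 == 2)
        let distrib := (PySem.List.pyRange 0 (n : Int) 1).filter
          (fun i => PySem.List.pyGetD cfg i 0 == 3)
        (prods, distrib, st.2.2 ++ [altGroup n prods distrib]))
      ([], [], []) := by
    apply PySem.List.foldl_congr_mem
    intro acc cfg hcfg
    have hlen := hmemlen cfg hcfg
    dsimp only
    rw [processing_plants_eq cfg]
    rw [stepAB n cfg hlen]
    unfold prodsOf distribOf
    rw [hlen]
  rw [hfold]
  obtain ⟨h1, h2⟩ := finalState_nodup n L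
  rw [PySem.Set.ofList_eq_self_of_nodup _ h1, PySem.Set.ofList_eq_self_of_nodup _ h2]

-- ===== VERDICT (by name: the statement is the Claim_ definition above) =====
theorem assign_all_perm_parents_spec : Claim_equal_assign_all_perm_parents := by
  unfold Claim_equal_assign_all_perm_parents Spec_assign_all_perm_parents
  intro sites _ _
  exact main_eq sites
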